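-- pv_equiv track=rewrite | github.com/kyb7640-gif/Python_BIN | 프로그래머스/0/181918. 배열 만들기 4/배열 만들기 4.py | solution
-- ===== SOURCE A (Python) =====
-- def solution(arr):
--     stk = []
--     i=0
--     j=-1
--     while (i<len(arr)):
--         if (len(stk) == 0):
--             stk.append(arr[i])
--             i+=1
--             j+=1
--         else:
--             if (stk[j] < arr[i]):
--                 stk.append(arr[i])
--                 i+=1
--                 j+=1
--             else:
--                 stk.pop()
--                 j-=1
--     return stk
-- ===== SOURCE B (Python) =====
-- def solution(arr):
--     # Backward pass: the answer is exactly the strict suffix-minima of arr,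
--     # read left to right. No stack, no pops: each element is looked at once.
--     out = []
--     for x in reversed(arr):
--         if not out or x < out[0]:
--             out = [x] + out
--     return out
-- ===== Notes on version B (the rewrite author's own statement) =====
-- stated objective: alternative
-- what changed: Replaces A's monotonic stack with push/pop by a single backward pass that keeps exactly the strict suffix-minima of arr: each element is examined once against the current head and either prefixed or discarded, nothing is ever removed.
import Mathlib
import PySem

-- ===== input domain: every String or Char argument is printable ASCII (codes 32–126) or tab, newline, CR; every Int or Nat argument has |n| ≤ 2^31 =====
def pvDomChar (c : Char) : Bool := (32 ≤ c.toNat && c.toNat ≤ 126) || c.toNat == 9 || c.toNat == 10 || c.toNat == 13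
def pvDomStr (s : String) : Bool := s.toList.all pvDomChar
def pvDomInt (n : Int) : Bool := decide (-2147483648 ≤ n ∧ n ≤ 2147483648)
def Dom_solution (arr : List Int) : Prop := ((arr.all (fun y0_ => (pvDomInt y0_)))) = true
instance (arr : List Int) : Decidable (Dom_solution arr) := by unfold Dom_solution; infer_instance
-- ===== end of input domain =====

-- B replaces A's forward monotonic stack (push/pop) by a single backward pass that
-- collects the strict suffix-minima of arr; nothing is ever removed (objective: alternative).

-- ===== PORT A =====
-- Literal port of A's while loop: state (stk, i, j); j mirrors Python's j.
-- The 'none' arm of stk[j] is unreachable (Python never raises: j = len(stk)-1 throughout).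
def solutionLoop (arr : List Int) (stk : List Int) (i : Nat) (j : Int) : List Int :=
  if h : i < arr.length then
    if stk.length = 0 then
      solutionLoop arr (stk ++ [arr[i]]) (i + 1) (j + 1)
    else
      match PySem.List.pyGet? stk j with
      | some v =>
        if v < arr[i] then
          solutionLoop arr (stk ++ [arr[i]]) (i + 1) (j + 1)
        else
          solutionLoop arr stk.dropLast i (j - 1)
      | none => stk
  else stk
termination_by 2 * (arr.length - i) + stk.length
decreasing_by
  · simp; omega
  · simp; omega
  · have : stk.length ≠ 0 := by assumption
    simp [List.length_dropLast]; omega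

def solution (arr : List Int) : List Int := solutionLoop arr [] 0 (-1)

-- ===== PORT B =====
-- 'if not out or x < out[0]: out = [x] + out' from Source B
def stepB (out : List Int) (x : Int) : List Int :=
  match out with
  | [] => [x]
  | h :: _ => if x < h then x :: out else out

def solution_alt (arr : List Int) : List Int := arr.reverse.foldl stepB []

-- ===== PRECONDITION & SPEC =====
def Spec_solution (arr : List Int) (out : List Int) : Prop := out = solution_alt arr
instance (arr : List Int) (out : List Int) : Decidable (Spec_solution arr out) := by unfold Spec_solution; infer_instance

-- ===== CLAIM (what is proved, stated in full; the proofs are below) =====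
def Claim_equal_solution : Prop := ∀ (arr : List Int), Dom_solution arr → Spec_solution arr (solution arr)

-- ===== LEMMAS AND PROOFS =====

-- proof-side model of A's behaviour: pop while top ≥ x, then push x
def popWhile (x : Int) (stk : List Int) : List Int :=
  match h : stk.getLast? with
  | some t => if t ≥ x then popWhile x stk.dropLast else stk
  | none => stk
termination_by stk.length
decreasing_by
  have : stk ≠ [] := by intro hn; simp [hn] at h
  simp [List.length_dropLast]
  exact List.length_pos_iff.mpr this

def stepA (stk : List Int) (x : Int) : List Int := popWhile x stk ++ [x]

lemma pyGet_last (stk : List Int) :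
    PySem.List.pyGet? stk ((stk.length : Int) - 1) = stk.getLast? := by
  cases stk with
  | nil => simp [PySem.List.pyGet?]
  | cons a l =>
    have h1 : ((a :: l).length : Int) - 1 = ((l.length : Nat) : Int) := by simp
    rw [h1, PySem.List.pyGet?_natCast]
    simp [List.getLast?_eq_getElem?]

lemma popWhile_nil (x : Int) : popWhile x [] = [] := by
  simp [popWhile]

lemma popWhile_stop (x : Int) (stk : List Int) (t : Int)
    (h : stk.getLast? = some t) (hlt : t < x) : popWhile x stk = stk := by
  rw [popWhile.eq_def]
  split <;> simp_all

lemma popWhile_pop (x : Int) (stk : List Int) (t : Int)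
    (h : stk.getLast? = some t) (hge : t ≥ x) :
    popWhile x stk = popWhile x stk.dropLast := by
  rw [popWhile.eq_def]
  split <;> simp_all

lemma loop_eq (n : Nat) : ∀ (arr stk : List Int) (i : Nat),
    2 * (arr.length - i) + stk.length ≤ n →
    solutionLoop arr stk i ((stk.length : Int) - 1)
      = (arr.drop i).foldl stepA stk := by
  induction n with
  | zero =>
    intro arr stk i h
    have hle : arr.length ≤ i := by omega
    rw [solutionLoop.eq_def]
    simp [Nat.not_lt.mpr hle, List.drop_eq_nil_of_le hle]
  | succ n ih =>
    intro arr stk i h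
    rw [solutionLoop.eq_def]
    by_cases hi : i < arr.length
    · have hdrop : arr.drop i = arr[i] :: arr.drop (i + 1) := (List.getElem_cons_drop hi).symm
      simp only [hi, ↓reduceDIte]
      by_cases hz : stk.length = 0
      · have hnil : stk = [] := List.eq_nil_of_length_eq_zero hz
        subst hnil
        have hj : ((0 : Nat) : Int) - 1 + 1 = ((([arr[i]] : List Int)).length : Int) - 1 := by simp
        simp only [List.length_nil, List.nil_append, ↓reduceIte, hj]
        rw [ih arr [arr[i]] (i + 1) (by simp; omega)]
        rw [hdrop]
        simp only [List.foldl_cons, stepA, popWhile_nil, List.nil_append]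
      · have hne : stk ≠ [] := fun hn => hz (by simp [hn])
        obtain ⟨t, ht⟩ : ∃ t, stk.getLast? = some t := by
          cases hlast : stk.getLast? with
          | none => exact absurd (List.getLast?_eq_none_iff.mp hlast) hne
          | some t => exact ⟨t, rfl⟩
        rw [if_neg hz, pyGet_last stk, ht]
        dsimp only
        by_cases hlt : t < arr[i]
        · rw [if_pos hlt]
          rw [show (((stk.length : Int) - 1) + 1) = (((stk ++ [arr[i]]).length : Int) - 1) by simp]
          rw [ih arr (stk ++ [arr[i]]) (i + 1) (by simp; omega)]
          rw [hdrop]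
          simp only [List.foldl_cons, stepA]
          rw [popWhile_stop arr[i] stk t ht hlt]
        · rw [if_neg hlt]
          have hdl : (((stk.length : Int) - 1) - 1) = ((stk.dropLast.length : Int) - 1) := by
            simp [List.length_dropLast]
            omega
          rw [hdl, ih arr stk.dropLast i (by simp [List.length_dropLast]; omega)]
          rw [hdrop]
          simp only [List.foldl_cons, stepA]
          rw [popWhile_pop arr[i] stk t ht (by omega)]
    · have hle : arr.length ≤ i := Nat.not_lt.mp hi
      simp [hi, List.drop_eq_nil_of_le hle]

-- popping while ≥ x then while ≥ h (h ≤ x) is just popping while ≥ h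
lemma popWhile_popWhile (n : Nat) : ∀ (s : List Int) (x h : Int),
    s.length ≤ n → h ≤ x → popWhile h (popWhile x s) = popWhile h s := by
  induction n with
  | zero =>
    intro s x h hn _
    have : s = [] := List.eq_nil_of_length_eq_zero (by omega)
    subst this; simp [popWhile_nil]
  | succ n ih =>
    intro s x h hn hle
    cases hlast : s.getLast? with
    | none =>
      have : s = [] := List.getLast?_eq_none_iff.mp hlast
      subst this; simp [popWhile_nil]
    | some t =>
      by_cases hx : t ≥ x
      · rw [popWhile_pop x s t hlast hx,
            popWhile_pop h s t hlast (by omega)]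
        have hne : s ≠ [] := by intro hn'; simp [hn'] at hlast
        exact ih s.dropLast x h
          (by simp [List.length_dropLast]
              have := List.length_pos_iff.mpr hne; omega) hle
      · rw [popWhile_stop x s t hlast (by omega)]

lemma popWhile_concat (h x : Int) (s : List Int) :
    popWhile h (s ++ [x]) = if h ≤ x then popWhile h s else s ++ [x] := by
  by_cases hx : h ≤ x
  · rw [if_pos hx, popWhile_pop h (s ++ [x]) x (by simp) (by omega)]
    simp
  · rw [if_neg hx, popWhile_stop h (s ++ [x]) x (by simp) (by omega)]

lemma foldl_stepA_ne_nil : ∀ (l : List Int) (x : Int) (stk : List Int),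
    List.foldl stepA stk (x :: l) ≠ [] := by
  intro l
  induction l with
  | nil => intro x stk; simp [stepA]
  | cons y l ih => intro x stk; exact ih y (stepA stk x)

-- main invariant: running A's loop from stk equals popping stk against the head of the
-- from-empty result and appending that result
lemma main_eq : ∀ (l : List Int) (x : Int) (stk : List Int),
    List.foldl stepA stk (x :: l)
      = popWhile ((List.foldl stepA [] (x :: l)).headD 0) stk
          ++ List.foldl stepA [] (x :: l) := by
  intro l
  induction l with
  | nil =>
    intro x stk
    simp [stepA, popWhile_nil]
  | cons y l ih =>
    intro x stk
    have hL : List.foldl stepA stk (x :: y :: l)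
        = List.foldl stepA (stepA stk x) (y :: l) := rfl
    set F := List.foldl stepA [] (y :: l) with hF
    set h := F.headD 0 with hh
    rw [hL, ih y (stepA stk x)]
    have hR : List.foldl stepA [] (x :: y :: l)
        = popWhile h [x] ++ F := by
      have : List.foldl stepA [] (x :: y :: l) = List.foldl stepA [x] (y :: l) := by
        simp [stepA, popWhile_nil]
      rw [this, ih y [x]]
    by_cases hxh : h ≤ x
    · have h1 : popWhile h (stepA stk x) = popWhile h stk := by
        rw [stepA, popWhile_concat, if_pos hxh]
        exact popWhile_popWhile stk.length stk x h le_rfl hxh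
      have h2 : popWhile h [x] = [] := by
        rw [show ([x] : List Int) = [] ++ [x] by simp, popWhile_concat, if_pos hxh,
            popWhile_nil]
      rw [h1, hR, h2, List.nil_append]
    · have h2 : popWhile h [x] = [x] := by
        rw [show ([x] : List Int) = [] ++ [x] by simp, popWhile_concat, if_neg hxh]
      have h1 : popWhile h (stepA stk x) = popWhile x stk ++ [x] := by
        rw [stepA, popWhile_concat, if_neg hxh]
      rw [h1, hR, h2]
      simp only [List.cons_append, List.headD_cons, List.nil_append,
        List.append_assoc, List.singleton_append]
      rfl

lemma foldl_eq_galt : ∀ (l : List Int),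
    List.foldl stepA [] l = l.reverse.foldl stepB [] := by
  intro l
  induction l with
  | nil => rfl
  | cons x l ih =>
    have hR : (x :: l).reverse.foldl stepB []
        = stepB (l.reverse.foldl stepB []) x := by
      simp [List.foldl_append]
    rw [hR, ← ih]
    cases l with
    | nil => simp [stepA, popWhile_nil, stepB]
    | cons y l' =>
      have hL : List.foldl stepA [] (x :: y :: l')
          = popWhile ((List.foldl stepA [] (y :: l')).headD 0) [x]
              ++ List.foldl stepA [] (y :: l') := by
        have : List.foldl stepA [] (x :: y :: l') = List.foldl stepA [x] (y :: l') := by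
          simp [stepA, popWhile_nil]
        rw [this, main_eq l' y [x]]
      set F := List.foldl stepA [] (y :: l') with hF
      obtain ⟨h0, rest, hFe⟩ : ∃ h0 rest, F = h0 :: rest := by
        cases hc : F with
        | nil => exact absurd hc (foldl_stepA_ne_nil l' y [])
        | cons a b => exact ⟨a, b, rfl⟩
      rw [hL, hFe]
      simp only [List.headD_cons, stepB]
      by_cases hx : x < h0
      · rw [popWhile_stop h0 [x] x (by simp) hx, if_pos hx]
        simp
      · have : popWhile h0 [x] = [] := by
          rw [popWhile_pop h0 [x] x (by simp) (by omega)]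
          simp [popWhile_nil]
        rw [this, if_neg hx]
        simp

theorem solution_eq_alt (arr : List Int) : solution arr = solution_alt arr := by
  have h1 := loop_eq (2 * arr.length) arr [] 0 (by simp)
  have h2 := foldl_eq_galt arr
  simpa [solution, solution_alt, h2] using h1

-- ===== VERDICT (by name: the statement is the Claim_ definition above) =====
theorem solution_spec : Claim_equal_solution := by
  intro arr _
  exact solution_eq_alt arr
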